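-- pv_equiv track=rewrite | github.com/jshelb/bpl-app | api/scheduler.py | divide_teams_evenly
-- ===== SOURCE A (Python) =====
-- def divide_teams_evenly(teams: list[str], num_groups: int):
--     """
--     Divide teams into groups more evenly.
--
--     Args:
--         teams (list): List of team identifiers.
--         num_groups (int): Number of groups to divide teams into.
--
--     Returns:
--         list: List of groups containing teams.
--
--     """
--     teams_per_group = len(teams) // num_groups
--     remainder = len(teams) % num_groups
--
--     initial_groups = []
--     start = 0
--     for i in range(num_groups):
--         group_size = teams_per_group + 1 if i < remainder else teams_per_group
--         initial_groups.append(teams[start:start + group_size])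
--         start += group_size
--
--     return initial_groups
-- ===== SOURCE B (Python) =====
-- def divide_teams_evenly(teams: list[str], num_groups: int):
--     """Peel-off re-implementation: repeatedly chop a group of ceil(len(rest)/k)
--     teams off the front of the remaining list, with k counting down."""
--     groups = []
--     rest = teams
--     k = num_groups
--     while k > 0:
--         head = -(-len(rest) // k)
--         groups.append(rest[:head])
--         rest = rest[head:]
--         k -= 1
--     return groups
-- ===== Notes on version B (the rewrite author's own statement) =====
-- stated objective: alternative
-- what changed: Replaces A's precomputed tpg/remainder and running start index with a peel-off loop: repeatedly chop a group of ceil(len(rest)/k) teams off the front of the remaining list while k counts down; no remainder or start index is ever computed (trades away A's index arithmetic for list consumption, at the cost of re-slicing the remainder each step).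
import Mathlib
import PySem

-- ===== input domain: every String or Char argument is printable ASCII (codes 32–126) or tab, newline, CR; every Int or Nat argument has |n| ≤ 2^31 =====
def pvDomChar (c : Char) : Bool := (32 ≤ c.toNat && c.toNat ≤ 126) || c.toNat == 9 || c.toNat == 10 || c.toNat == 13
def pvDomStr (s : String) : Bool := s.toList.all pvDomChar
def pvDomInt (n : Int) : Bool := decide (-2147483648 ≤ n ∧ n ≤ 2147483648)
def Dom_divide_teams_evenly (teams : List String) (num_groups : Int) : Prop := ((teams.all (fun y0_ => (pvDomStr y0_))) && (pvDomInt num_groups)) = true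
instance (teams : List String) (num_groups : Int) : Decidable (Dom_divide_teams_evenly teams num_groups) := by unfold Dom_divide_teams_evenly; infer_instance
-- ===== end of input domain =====

-- B replaces A's precomputed tpg/remainder sizes and running start index by a peel-off
-- loop that chops a group of ceil(len(rest)/k) teams off the front of the remaining list
-- while k counts down (objective: alternative decomposition, same cost).

-- ===== PORT A =====
def divide_teams_evenly (teams : List String) (num_groups : Int) : List (List String) :=
  let teams_per_group := PySem.Int.floordiv (teams.length : Int) num_groups
  let remainder := PySem.Int.mod (teams.length : Int) num_groups
  let res := (PySem.List.pyRange 0 num_groups 1).foldl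
    (fun (st : List (List String) × Int) i =>
      let group_size := if i < remainder then teams_per_group + 1 else teams_per_group
      (st.1 ++ [PySem.List.slice teams (some st.2) (some (st.2 + group_size))], st.2 + group_size))
    ([], 0)
  res.1

-- ===== PORT B =====
def pvLoopB (groups : List (List String)) (rest : List String) (k : Int) : List (List String) :=
  if h : 0 < k then
    let head := -(PySem.Int.floordiv (-(rest.length : Int)) k)
    pvLoopB (groups ++ [PySem.List.slice rest none (some head)])
      (PySem.List.slice rest (some head) none) (k - 1)
  else groups
termination_by k.toNat
decreasing_by omega

def divide_teams_evenly_alt (teams : List String) (num_groups : Int) : List (List String) :=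
  pvLoopB [] teams num_groups

-- ===== PRECONDITION & SPEC =====
-- Pre_ excludes exactly num_groups = 0, where Python A's '//' raises ZeroDivisionError.
def Pre_divide_teams_evenly (teams : List String) (num_groups : Int) : Prop := num_groups ≠ 0
instance (teams : List String) (num_groups : Int) : Decidable (Pre_divide_teams_evenly teams num_groups) := by unfold Pre_divide_teams_evenly; infer_instance
def pvWitness_divide_teams_evenly : List String × Int := (["a", "b", "c", "d", "e"], 2)

def Spec_divide_teams_evenly (teams : List String) (num_groups : Int) (out : List (List String)) : Prop := out = divide_teams_evenly_alt teams num_groups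
instance (teams : List String) (num_groups : Int) (out : List (List String)) : Decidable (Spec_divide_teams_evenly teams num_groups out) := by unfold Spec_divide_teams_evenly; infer_instance

-- ===== CLAIM (what is proved, stated in full; the proofs are below) =====
def Claim_equal_divide_teams_evenly : Prop := ∀ (teams : List String) (num_groups : Int), Dom_divide_teams_evenly teams num_groups → Pre_divide_teams_evenly teams num_groups → Spec_divide_teams_evenly teams num_groups (divide_teams_evenly teams num_groups)

-- ===== LEMMAS AND PROOFS =====

/-- A's group-size table for a list of length m split into k groups. -/
def pvSizes (m k : Int) : List Int :=
  List.replicate (PySem.Int.mod m k).toNat (PySem.Int.floordiv m k + 1) ++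
    List.replicate (k - PySem.Int.mod m k).toNat (PySem.Int.floordiv m k)

/-- B's group-size table: successive ceiling divisions. -/
def pvCeilSizes (m : Int) : Nat → List Int
  | 0 => []
  | k + 1 =>
    let h := -(PySem.Int.floordiv (-m) ((k : Int) + 1))
    h :: pvCeilSizes (m - h) k

/-- Chop successive prefixes of the given sizes off the list. -/
def pvChunks (teams : List String) : List Int → List (List String)
  | [] => []
  | g :: gs => teams.take g.toNat :: pvChunks (teams.drop g.toNat) gs

/-- A's slice-by-running-start groups. -/
def pvGroups (teams : List String) : List Int → Int → List (List String)
  | [], _ => []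
  | g :: gs, s => PySem.List.slice teams (some s) (some (s + g)) :: pvGroups teams gs (s + g)

theorem pvFoldA (teams : List String) (sizes : List Int) (acc : List (List String)) (s : Int) :
    (sizes.foldl
      (fun (st : List (List String) × Int) v =>
        (st.1 ++ [PySem.List.slice teams (some st.2) (some (st.2 + v))], st.2 + v)) (acc, s)).1
      = acc ++ pvGroups teams sizes s := by
  induction sizes generalizing acc s with
  | nil => simp [pvGroups]
  | cons g gs ih => simp [pvGroups, ih]

theorem pvMapSizes (r a b n : Int) (h0 : 0 ≤ r) (h1 : r ≤ n) :
    (PySem.List.pyRange 0 n 1).map (fun i => if i < r then a else b)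
      = List.replicate r.toNat a ++ List.replicate (n - r).toNat b := by
  rw [PySem.List.pyRange_one_append 0 r n h0 h1, List.map_append]
  congr 1
  · have hmem : ∀ x ∈ (PySem.List.pyRange 0 r 1).map (fun i => if i < r then a else b), x = a := by
      intro x hx
      simp only [List.mem_map] at hx
      obtain ⟨i, hi, rfl⟩ := hx
      rw [PySem.List.mem_pyRange_one] at hi
      simp [hi.2]
    rw [List.eq_replicate_of_mem hmem, List.length_map, PySem.List.length_pyRange_one]
    simp
  · have hmem : ∀ x ∈ (PySem.List.pyRange r n 1).map (fun i => if i < r then a else b), x = b := by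
      intro x hx
      simp only [List.mem_map] at hx
      obtain ⟨i, hi, rfl⟩ := hx
      rw [PySem.List.mem_pyRange_one] at hi
      have : ¬ i < r := not_lt.mpr hi.1
      simp [this]
    rw [List.eq_replicate_of_mem hmem, List.length_map, PySem.List.length_pyRange_one]

theorem pvGroups_eq_chunks (teams : List String) (sizes : List Int) (s : Int)
    (hs : 0 ≤ s) (hg : ∀ g ∈ sizes, 0 ≤ g) :
    pvGroups teams sizes s = pvChunks (teams.drop s.toNat) sizes := by
  induction sizes generalizing s with
  | nil => simp [pvGroups, pvChunks]
  | cons g gs ih =>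
    have hg0 : 0 ≤ g := hg g (by simp)
    have hslice : PySem.List.slice teams (some s) (some (s + g))
        = (teams.drop s.toNat).take g.toNat := by
      rw [PySem.List.slice_toNat teams hs (by omega)]
      have : (s + g).toNat - s.toNat = g.toNat := by omega
      rw [this]
    simp only [pvGroups, pvChunks, hslice]
    rw [ih (s + g) (by omega) (fun x hx => hg x (by simp [hx]))]
    have h3 : s.toNat + g.toNat = (s + g).toNat := by omega
    rw [List.drop_drop, h3]

/-- The ceiling head: bracket characterisation. -/
theorem pvHead_brackets (m k : Int) (hk : 0 < k) :
    (-(PySem.Int.floordiv (-m) k) - 1) * k < m ∧ m ≤ -(PySem.Int.floordiv (-m) k) * k :=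
  (PySem.Int.neg_floordiv_neg_eq_iff_of_pos (a := m) (b := k)
    (q := -(PySem.Int.floordiv (-m) k)) hk).mp rfl

theorem pvCeilSizes_eq_pvSizes (j : Nat) : ∀ (m : Int), 0 ≤ m →
    pvCeilSizes m (j + 1) = pvSizes m ((j : Int) + 1) := by
  induction j with
  | zero =>
    intro m hm
    have hb := pvHead_brackets m 1 (by omega)
    have hfd : PySem.Int.floordiv m 1 = m := by
      rw [PySem.Int.floordiv_eq_iff_of_pos (by omega)]; omega
    have hmod : PySem.Int.mod m 1 = 0 := by
      have := PySem.Int.floordiv_mul_add_mod m 1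
      rw [hfd] at this; omega
    have hhm : -(PySem.Int.floordiv (-m) 1) = m := by omega
    show (-(PySem.Int.floordiv (-m) ((0 : Nat) + 1 : Int))) ::
        pvCeilSizes (m - -(PySem.Int.floordiv (-m) ((0 : Nat) + 1 : Int))) 0 = pvSizes m ((0 : Nat) + 1 : Int)
    norm_num [hhm, pvCeilSizes, pvSizes, hmod, hfd]
  | succ j ih =>
    intro m hm
    have hk1 : (0 : Int) < (j : Int) + 1 + 1 := by omega
    have hb := pvHead_brackets m ((j : Int) + 1 + 1) hk1
    set k : Int := (j : Int) + 1 + 1 with hkdef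
    set h := -(PySem.Int.floordiv (-m) k) with hh
    set tpg := PySem.Int.floordiv m k with htpg
    set r := PySem.Int.mod m k with hr
    have heq : tpg * k + r = m := PySem.Int.floordiv_mul_add_mod m k
    have hr0 : 0 ≤ r := PySem.Int.mod_nonneg m hk1
    have hrk : r < k := PySem.Int.mod_lt m hk1
    have htb : tpg * k ≤ m ∧ m < (tpg + 1) * k :=
      (PySem.Int.floordiv_eq_iff_of_pos (a := m) (b := k) (q := tpg) hk1).mp rfl
    have htpg0 : 0 ≤ tpg := by
      by_contra hneg
      push_neg at hneg
      have h1 : (tpg + 1) * k ≤ 0 :=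
        mul_nonpos_iff.mpr (Or.inr ⟨by omega, by omega⟩)
      linarith [htb.2]
    have hhead : h = if 0 < r then tpg + 1 else tpg := by
      by_cases hc : 0 < r
      · rw [if_pos hc]
        have hu : h - 1 < tpg + 1 := by
          have hlt : (h - 1) * k < (tpg + 1) * k := lt_of_lt_of_le hb.1 (le_of_lt htb.2)
          exact lt_of_mul_lt_mul_right hlt (le_of_lt hk1)
        have hl : tpg < h := by
          have hlt : tpg * k < h * k := lt_of_lt_of_le (by omega) hb.2
          exact lt_of_mul_lt_mul_right hlt (le_of_lt hk1)
        omega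
      · rw [if_neg hc]
        have hre : r = 0 := by omega
        have hu : h - 1 < tpg := by
          have hlt : (h - 1) * k < tpg * k := lt_of_lt_of_le hb.1 (by omega)
          exact lt_of_mul_lt_mul_right hlt (le_of_lt hk1)
        have hl : tpg ≤ h := by
          have hle2 : tpg * k ≤ h * k := le_trans (by omega) hb.2
          exact le_of_mul_le_mul_right hle2 hk1
        omega
    have hexp : tpg * (k - 1) = tpg * k - tpg := by ring
    have hnn : 0 ≤ tpg * (k - 1) := mul_nonneg htpg0 (by omega)
    have hm' : 0 ≤ m - h := by
      by_cases hc : 0 < r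
      · rw [hhead, if_pos hc]; linarith [heq]
      · rw [hhead, if_neg hc]
        have hre : r = 0 := by omega
        linarith [heq]
    have hkk : (0 : Int) < k - 1 := by omega
    have hexp2 : (tpg + 1) * (k - 1) = tpg * k + k - tpg - 1 := by ring
    have htpg' : PySem.Int.floordiv (m - h) (k - 1) = tpg := by
      rw [PySem.Int.floordiv_eq_iff_of_pos hkk]
      by_cases hc : 0 < r
      · rw [hhead, if_pos hc]
        constructor <;> linarith [heq]
      · have hre : r = 0 := by omega
        rw [hhead, if_neg hc]
        constructor <;> linarith [heq]
    have hmod' : PySem.Int.mod (m - h) (k - 1) = if 0 < r then r - 1 else 0 := by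
      have h2 := PySem.Int.floordiv_mul_add_mod (m - h) (k - 1)
      rw [htpg'] at h2
      by_cases hc : 0 < r
      · rw [if_pos hc]
        have hhv : h = tpg + 1 := by rw [hhead, if_pos hc]
        linarith [heq, hexp]
      · rw [if_neg hc]
        have hre : r = 0 := by omega
        have hhv : h = tpg := by rw [hhead, if_neg hc]
        linarith [heq, hexp]
    show pvCeilSizes m (j + 1 + 1) = pvSizes m k
    rw [pvCeilSizes]
    have hcast : ((j + 1 : Nat) : Int) + 1 = k := by push_cast [hkdef]; ring
    simp only [hcast, ← hh]
    rw [ih (m - h) hm']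
    have hk1e : ((j : Nat) : Int) + 1 = k - 1 := by omega
    rw [hk1e]
    unfold pvSizes
    rw [htpg', hmod', ← htpg, ← hr]
    by_cases hc : 0 < r
    · rw [if_pos hc, hhead, if_pos hc]
      have h1 : r.toNat = (r - 1).toNat + 1 := by omega
      have h2 : (k - r).toNat = (k - 1 - (r - 1)).toNat := by omega
      rw [h1, h2, List.replicate_succ]
      simp
    · have hre : r = 0 := by omega
      rw [if_neg hc, hhead, if_neg hc, hre]
      have h2 : (k - 0).toNat = (k - 1 - 0).toNat + 1 := by omega
      simp only [h2, List.replicate_succ]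
      simp

theorem pvLoop_nil (groups : List (List String)) (rest : List String) (k : Int) (hk : k ≤ 0) :
    pvLoopB groups rest k = groups := by
  rw [pvLoopB, dif_neg (by omega)]

theorem pvLoopChunks (j : Nat) : ∀ (rest : List String) (acc : List (List String)),
    pvLoopB acc rest ((j : Nat) : Int)
      = acc ++ pvChunks rest (pvCeilSizes (rest.length : Int) j) := by
  induction j with
  | zero =>
    intro rest acc
    rw [pvLoop_nil _ _ _ (by omega)]
    simp [pvCeilSizes, pvChunks]
  | succ j ih =>
    intro rest acc
    have hk1 : (0 : Int) < ((j + 1 : Nat) : Int) := by omega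
    rw [pvLoopB, dif_pos hk1]
    have hb := pvHead_brackets (rest.length : Int) ((j + 1 : Nat) : Int) hk1
    set k2 : Int := ((j + 1 : Nat) : Int) with hk2
    set h := -(PySem.Int.floordiv (-(rest.length : Int)) k2) with hh
    show pvLoopB (acc ++ [PySem.List.slice rest none (some h)])
        (PySem.List.slice rest (some h) none) (k2 - 1)
      = acc ++ pvChunks rest (pvCeilSizes (rest.length : Int) (j + 1))
    have hL0 : (0 : Int) ≤ (rest.length : Int) := Int.natCast_nonneg _
    have hh0 : 0 ≤ h := by
      by_contra hneg
      push_neg at hneg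
      have h1 : h * k2 < 0 := mul_neg_of_neg_of_pos hneg hk1
      linarith [hb.2]
    have hhle : h ≤ (rest.length : Int) := by
      by_contra hgt
      push_neg at hgt
      have hnn2 : 0 ≤ (h - 1) * (k2 - 1) := mul_nonneg (by omega) (by omega)
      have hexp : (h - 1) * k2 = (h - 1) * (k2 - 1) + (h - 1) := by ring
      linarith [hb.1]
    rw [PySem.List.slice_to rest hh0, PySem.List.slice_from rest hh0]
    have hstep : ((j + 1 : Nat) : Int) - 1 = ((j : Nat) : Int) := by push_cast; ring
    rw [hk2, hstep, ih (rest.drop h.toNat)]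
    have hlen : (((rest.drop h.toNat).length : Nat) : Int) = (rest.length : Int) - h := by
      simp only [List.length_drop]
      omega
    rw [hlen]
    have hcast : ((j + 1 : Nat) : Int) = ((j : Nat) : Int) + 1 := by push_cast; ring
    have hfold : ((j : Nat) : Int) + 1 = k2 := by omega
    simp only [pvCeilSizes, pvChunks, List.append_assoc, List.singleton_append, hfold, ← hh]

-- ===== VERDICT (by name: the statement is the Claim_ definition above) =====
theorem divide_teams_evenly_spec : Claim_equal_divide_teams_evenly := by
  intro teams n _ hn
  unfold Spec_divide_teams_evenly divide_teams_evenly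
  simp only []
  set m : Int := (teams.length : Int) with hm
  set tpg := PySem.Int.floordiv m n with htpg
  set r := PySem.Int.mod m n with hr
  rcases lt_trichotomy n 0 with hneg | hz | hpos
  · -- n < 0: both sides empty
    have hb := PySem.Int.mod_neg_bounds m hneg
    rw [PySem.List.pyRange_one_eq_nil (by omega)]
    rw [divide_teams_evenly_alt, pvLoop_nil _ _ _ (by omega)]
    simp
  · exact absurd hz hn
  · -- n > 0
    have h0 : 0 ≤ r := PySem.Int.mod_nonneg _ hpos
    have h1 : r ≤ n := le_of_lt (PySem.Int.mod_lt _ hpos)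
    have hmap := pvMapSizes r (tpg + 1) tpg n h0 h1
    rw [← List.foldl_map (f := fun i => if i < r then tpg + 1 else tpg)
        (g := fun (st : List (List String) × Int) v =>
          (st.1 ++ [PySem.List.slice teams (some st.2) (some (st.2 + v))], st.2 + v)), hmap,
      pvFoldA]
    have hsz : List.replicate r.toNat (tpg + 1) ++ List.replicate (n - r).toNat tpg = pvSizes m n := by
      simp [pvSizes, ← htpg, ← hr]
    rw [List.nil_append, hsz]
    have htb : tpg * n ≤ m ∧ m < (tpg + 1) * n :=
      (PySem.Int.floordiv_eq_iff_of_pos (a := m) (b := n) (q := tpg) hpos).mp rfl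
    have htpg0 : 0 ≤ tpg := by nlinarith [htb.1, htb.2, hm ▸ Int.natCast_nonneg teams.length]
    have hg : ∀ g ∈ pvSizes m n, 0 ≤ g := by
      intro g hgm
      simp only [pvSizes, List.mem_append, List.mem_replicate] at hgm
      rcases hgm with ⟨_, rfl⟩ | ⟨_, rfl⟩ <;> omega
    rw [pvGroups_eq_chunks teams _ 0 le_rfl hg]
    have hj : ∃ j : Nat, n = ((j + 1 : Nat) : Int) := ⟨(n - 1).toNat, by omega⟩
    obtain ⟨j, rfl⟩ := hj
    rw [divide_teams_evenly_alt, pvLoopChunks (j + 1) teams []]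
    have hc2 : pvCeilSizes m (j + 1) = pvSizes m (((j + 1 : Nat) : Int)) := by
      rw [pvCeilSizes_eq_pvSizes j m (by positivity)]
      norm_num
    rw [hc2]
    simp
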